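-- pv_equiv track=rewrite | github.com/devrajPriyadarshi/AIFA-Logic-Minimization | mark3.py | convert_wrd_to_bin
-- ===== SOURCE A (Python) =====
-- def convert_wrd_to_bin(bin_wrd):
--
--     length = len(bin_wrd)
--     ans =["1"]*length;
--
--     for i in range(length):
--
--         x = chr(65+i)
--         ind = bin_wrd.find(x)
--
--         if ind == -1:
--             ans[i] = "0"
--
--     return "".join(ans)
-- ===== SOURCE B (Python) =====
-- def convert_wrd_to_bin(bin_wrd):
--     length = len(bin_wrd)
--     buf = bytearray(b'0') * length
--     for c in set(bin_wrd):
--         idx = ord(c) - 65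
--         if 0 <= idx < length:
--             buf[idx] = 49  # ord('1')
--     return buf.decode()
-- ===== Notes on version B (the rewrite author's own statement) =====
-- stated objective: faster
-- what changed: Instead of running one str.find over the whole string for every output position, B allocates a zero-marked byte buffer and makes a single scatter pass over the distinct characters of the string, marking buffer position ord(c)-65 for each in-range character.
import Mathlib
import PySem

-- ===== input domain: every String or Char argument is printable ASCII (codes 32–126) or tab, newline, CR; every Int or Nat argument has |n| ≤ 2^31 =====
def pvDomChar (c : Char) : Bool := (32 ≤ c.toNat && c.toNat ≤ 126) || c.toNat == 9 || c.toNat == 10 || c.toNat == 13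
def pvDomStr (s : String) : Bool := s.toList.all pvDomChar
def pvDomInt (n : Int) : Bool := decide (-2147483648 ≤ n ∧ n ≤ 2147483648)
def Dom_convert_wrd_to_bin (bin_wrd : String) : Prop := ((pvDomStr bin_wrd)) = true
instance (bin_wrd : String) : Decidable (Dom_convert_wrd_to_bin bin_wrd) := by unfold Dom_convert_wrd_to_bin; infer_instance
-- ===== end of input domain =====

-- B replaces A's per-output-position str.find search with one scatter pass: it marks buckets for the distinct characters of the string, then renders the buckets.

-- ===== PORT A =====
def convert_wrd_to_bin (bin_wrd : String) : String :=
  let length : Int := PySem.Str.len bin_wrd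
  let ans : List String := PySem.List.pyRepeat ["1"] length
  let ans :=
    (PySem.List.pyRange 0 length 1).foldl (fun ans i =>
      let x : String := String.ofList [Char.ofNat (65 + i).toNat]
      let ind : Int := PySem.Str.find bin_wrd x
      if ind = -1 then ans.set i.toNat "0" else ans) ans
  PySem.Str.join "" ans

-- ===== PORT B =====
def convert_wrd_to_bin_alt (bin_wrd : String) : String :=
  let length : Nat := bin_wrd.toList.length
  let buf : List Char := List.replicate length '0'
  let buf :=
    (PySem.Set.ofList bin_wrd.toList).foldl (fun buf c =>
      let idx : Int := (c.toNat : Int) - 65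
      if 0 ≤ idx ∧ idx < (length : Int) then buf.set idx.toNat '1' else buf) buf
  String.ofList buf

-- ===== PRECONDITION & SPEC =====
-- Pre_ excludes exactly the strings of length ≥ 1114048, on which A raises ValueError (chr(65+i) past the last code point).
def Pre_convert_wrd_to_bin (bin_wrd : String) : Prop := bin_wrd.toList.length ≤ 1114047
instance (bin_wrd : String) : Decidable (Pre_convert_wrd_to_bin bin_wrd) := by unfold Pre_convert_wrd_to_bin; infer_instance
def pvWitness_convert_wrd_to_bin : String := "CAB"

def Spec_convert_wrd_to_bin (bin_wrd : String) (out : String) : Prop := out = convert_wrd_to_bin_alt bin_wrd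
instance (bin_wrd : String) (out : String) : Decidable (Spec_convert_wrd_to_bin bin_wrd out) := by unfold Spec_convert_wrd_to_bin; infer_instance

-- ===== CLAIM (what is proved, stated in full; the proofs are below) =====
def Claim_equal_convert_wrd_to_bin : Prop := ∀ (bin_wrd : String), Dom_convert_wrd_to_bin bin_wrd → Pre_convert_wrd_to_bin bin_wrd → Spec_convert_wrd_to_bin bin_wrd (convert_wrd_to_bin bin_wrd)

-- ===== LEMMAS AND PROOFS =====

-- A's loop body, with the searched string fixed
def pvStepA (s : List Char) (ans : List String) (i : Int) : List String :=
  if PySem.Chars.find s [Char.ofNat (65 + i).toNat] = -1 then ans.set i.toNat "0" else ans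

-- B's loop body, with the fixed length n
def pvStepB (n : Nat) (buf : List Char) (c : Char) : List Char :=
  if 0 ≤ (c.toNat : Int) - 65 ∧ (c.toNat : Int) - 65 < (n : Int) then buf.set ((c.toNat : Int) - 65).toNat '1' else buf

lemma pvStepA_length (s : List Char) (ans : List String) (i : Int) :
    (pvStepA s ans i).length = ans.length := by
  unfold pvStepA; split <;> simp

lemma pvFoldA_get (s : List Char) (r : List Int) : ∀ (ans : List String) (i : Nat),
    i < ans.length → (∀ j ∈ r, 0 ≤ j) →
    (r.foldl (pvStepA s) ans)[i]? =
      if ((i : Int) ∈ r ∧ PySem.Chars.find s [Char.ofNat (65 + i)] = -1) then some "0" else ans[i]? := by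
  induction r with
  | nil => intro ans i hi _; simp
  | cons j r ih =>
    intro ans i hi hpos
    have hj : 0 ≤ j := hpos j (by simp)
    have hlen : (pvStepA s ans j).length = ans.length := pvStepA_length s ans j
    rw [List.foldl_cons, ih _ i (by omega) (fun j hj => hpos j (by simp [hj]))]
    unfold pvStepA
    by_cases hij : (i : Int) = j
    · have hti : j.toNat = i := by omega
      have hx : (65 + j).toNat = 65 + i := by omega
      by_cases hf : PySem.Chars.find s [Char.ofNat (65 + i)] = -1
      · rw [hx, if_pos hf, hti, List.getElem?_set_self hi]
        simp [hf, List.mem_cons, ← hij]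
      · have hx2 : ((65 : Int) + (i : Nat)).toNat = 65 + i := by omega
        rw [← hij, hx2, if_neg hf]
        simp [hf]
    · have hji : j.toNat ≠ i := by omega
      have hiff : ∀ P : Prop, (((i : Int) = j ∨ (i : Int) ∈ r) ∧ P) ↔ ((i : Int) ∈ r ∧ P) := by
        intro P; constructor
        · rintro ⟨h1 | h1, h2⟩
          · exact absurd h1 hij
          · exact ⟨h1, h2⟩
        · rintro ⟨h1, h2⟩; exact ⟨Or.inr h1, h2⟩
      by_cases hf : PySem.Chars.find s [Char.ofNat (65 + j).toNat] = -1
      · rw [if_pos hf, List.getElem?_set_ne hji]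
        simp [hiff]
      · rw [if_neg hf]
        simp [hiff]

lemma pvStepB_length (n : Nat) (buf : List Char) (c : Char) :
    (pvStepB n buf c).length = buf.length := by
  unfold pvStepB; split <;> simp

lemma pvFoldB_get (n : Nat) (cs : List Char) : ∀ (buf : List Char) (i : Nat),
    i < buf.length → i < n →
    (cs.foldl (pvStepB n) buf)[i]? =
      if cs.any (fun c => c.toNat == 65 + i) then some '1' else buf[i]? := by
  induction cs with
  | nil => intro buf i _ _; simp
  | cons c cs ih =>
    intro buf i hi hn
    have hlen : (pvStepB n buf c).length = buf.length := pvStepB_length n buf c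
    rw [List.foldl_cons, ih _ i (by omega) hn]
    by_cases hc : c.toNat = 65 + i
    · have h1 : (0:Int) ≤ (c.toNat : Int) - 65 ∧ (c.toNat : Int) - 65 < (n : Int) := by
        constructor
        · omega
        · rw [hc]; push_cast; omega
      have h2 : ((c.toNat : Int) - 65).toNat = i := by omega
      have hset : (pvStepB n buf c)[i]? = some '1' := by
        unfold pvStepB; rw [if_pos h1, h2, List.getElem?_set_self hi]
      by_cases hany : cs.any (fun c => c.toNat == 65 + i) = true
      · simp [hany, hc]
      · rw [if_neg (by simp [hany]), hset]
        simp [hc]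
    · have hstep : (pvStepB n buf c)[i]? = buf[i]? := by
        unfold pvStepB
        by_cases h1 : (0:Int) ≤ (c.toNat : Int) - 65 ∧ (c.toNat : Int) - 65 < (n : Int)
        · have h2 : ((c.toNat : Int) - 65).toNat ≠ i := by omega
          rw [if_pos h1, List.getElem?_set_ne h2]
        · rw [if_neg h1]
      rw [hstep]
      simp [hc]

-- Under Dom (all chars ≤ 126) and 65 + i a representable code:
lemma pvMem_iff (l : List Char) (i : Nat) (hdom : ∀ c ∈ l, pvDomChar c = true) (hi : 65 + i ≤ 1114111) :
    (Char.ofNat (65 + i) ∈ l ↔ l.any (fun c => c.toNat == 65 + i) = true) := by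
  by_cases hv : (65 + i).isValidChar
  · have ht : (Char.ofNat (65 + i)).toNat = 65 + i := by
      unfold Char.ofNat; rw [dif_pos hv]
      simp [Char.ofNatAux, Char.toNat]
      rcases hv with h | ⟨h1, h2⟩ <;> omega
    simp only [List.any_eq_true, beq_iff_eq]
    constructor
    · intro hm; exact ⟨_, hm, ht⟩
    · rintro ⟨c, hc, hce⟩
      have : c = Char.ofNat (65 + i) := by
        rw [← Char.ofNat_toNat c, hce]
      rwa [← this]
  · have ht : (Char.ofNat (65 + i)).toNat = 0 := by
      unfold Char.ofNat; rw [dif_neg hv]; rfl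
    have hbig : 55296 ≤ 65 + i := by
      by_contra h
      exact hv (Or.inl (by omega))
    simp only [List.any_eq_true, beq_iff_eq]
    constructor
    · intro hm
      have := hdom _ hm
      simp [pvDomChar, ht] at this
    · rintro ⟨c, hc, hce⟩
      have := hdom _ hc
      simp [pvDomChar, hce] at this
      omega

lemma pvFoldA_length (s : List Char) (r : List Int) : ∀ (ans : List String),
    (r.foldl (pvStepA s) ans).length = ans.length := by
  induction r with
  | nil => intro ans; simp
  | cons j r ih => intro ans; rw [List.foldl_cons, ih, pvStepA_length]

lemma pvFoldB_length (n : Nat) (cs : List Char) : ∀ (buf : List Char),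
    (cs.foldl (pvStepB n) buf).length = buf.length := by
  induction cs with
  | nil => intro buf; simp
  | cons c cs ih => intro buf; rw [List.foldl_cons, ih, pvStepB_length]

lemma pvSingleton_infix (x : Char) (l : List Char) : [x] <:+: l ↔ x ∈ l := by
  constructor
  · intro h; exact h.subset (List.mem_singleton_self x)
  · intro h
    obtain ⟨u, v, rfl⟩ := List.append_of_mem h
    exact ⟨u, v, by simp⟩

-- ===== VERDICT (by name: the statement is the Claim_ definition above) =====
theorem convert_wrd_to_bin_spec : Claim_equal_convert_wrd_to_bin := by
  intro s hdom hpre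
  unfold Dom_convert_wrd_to_bin pvDomStr at hdom
  rw [List.all_eq_true] at hdom
  unfold Pre_convert_wrd_to_bin at hpre
  unfold Spec_convert_wrd_to_bin convert_wrd_to_bin convert_wrd_to_bin_alt
  dsimp only
  rw [show PySem.Str.len s = ((s.toList.length : Int)) by simp]
  have hlamA : (fun (ans : List String) (i : Int) =>
      let x : String := String.ofList [Char.ofNat (65 + i).toNat]
      let ind : Int := PySem.Str.find s x
      if ind = -1 then ans.set i.toNat "0" else ans) = pvStepA s.toList := by
    funext ans i
    simp [pvStepA]
  have hlamB : (fun (buf : List Char) (c : Char) =>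
      let idx : Int := (c.toNat : Int) - 65
      if 0 ≤ idx ∧ idx < ((s.toList.length : Nat) : Int) then buf.set idx.toNat '1' else buf)
      = pvStepB s.toList.length := by
    funext buf c
    simp [pvStepB]
  rw [hlamA, hlamB]
  rw [show PySem.List.pyRepeat ["1"] ((s.toList.length : Int)) = List.replicate s.toList.length "1" by
    simp [PySem.List.pyRepeat_singleton]]
  set l := s.toList with hl
  set n := l.length with hn
  set bufB : List Char := (PySem.Set.ofList l).foldl (pvStepB n) (List.replicate n '0') with hbuf
  have key : (PySem.List.pyRange 0 (n : Int) 1).foldl (pvStepA l) (List.replicate n "1")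
      = bufB.map (fun c => String.ofList [c]) := by
    apply List.ext_getElem?
    intro i
    have hlenA : ((PySem.List.pyRange 0 (n : Int) 1).foldl (pvStepA l) (List.replicate n "1")).length = n := by
      rw [pvFoldA_length]; simp
    have hlenB : bufB.length = n := by
      rw [hbuf, pvFoldB_length]; simp
    by_cases hi : i < n
    · rw [pvFoldA_get l _ _ i (by simp [hi]) (fun j hj => ((PySem.List.mem_pyRange_one).mp hj).1)]
      have hmem : (i : Int) ∈ PySem.List.pyRange 0 (n : Int) 1 := by
        rw [PySem.List.mem_pyRange_one]; omega
      have hBfold := pvFoldB_get n (PySem.Set.ofList l) (List.replicate n '0') i (by simp [hi]) hi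
      rw [List.getElem?_map, hbuf, hBfold]
      have hset_any : ((PySem.Set.ofList l).any (fun c => c.toNat == 65 + i) = true)
          ↔ (l.any (fun c => c.toNat == 65 + i) = true) := by
        simp only [List.any_eq_true]
        constructor
        · rintro ⟨c, hc, h⟩; exact ⟨c, (PySem.Set.mem_ofList l c).mp hc, h⟩
        · rintro ⟨c, hc, h⟩; exact ⟨c, (PySem.Set.mem_ofList l c).mpr hc, h⟩
      have hiff : (PySem.Chars.find l [Char.ofNat (65 + i)] = -1)
          ↔ ¬ (l.any (fun c => c.toNat == 65 + i) = true) := by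
        rw [PySem.Chars.find_eq_neg_one_iff, pvSingleton_infix,
          pvMem_iff l i hdom (by omega)]
      by_cases hany : l.any (fun c => c.toNat == 65 + i) = true
      · rw [if_neg (fun h => (hiff.mp h.2) hany), if_pos (hset_any.mpr hany)]
        simp [hi]
      · rw [if_pos ⟨hmem, hiff.mpr hany⟩, if_neg (fun h => hany (hset_any.mp h))]
        simp [hi]
    · rw [List.getElem?_eq_none (by omega), List.getElem?_eq_none (by rw [List.length_map]; omega)]
  rw [key]
  have htl : (PySem.Str.join "" (bufB.map (fun c => String.ofList [c]))).toList = bufB := by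
    rw [PySem.Str.toList_join]
    have : (bufB.map (fun c => String.ofList [c])).map String.toList = bufB.map (fun c => [c]) := by
      rw [List.map_map]; apply List.map_congr_left; intro c _; simp
    rw [this]
    exact PySem.Chars.join_nil_singletons (cs := bufB)
  calc PySem.Str.join "" (bufB.map (fun c => String.ofList [c]))
      = String.ofList (PySem.Str.join "" (bufB.map (fun c => String.ofList [c]))).toList := by
        rw [String.ofList_toList]
    _ = String.ofList bufB := by rw [htl]
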